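-- pv_equiv track=rewrite | github.com/rf-iasys/OEIS | OEIS_A000225.py | A000225
-- ===== SOURCE A (Python) =====
-- def A000225(n):
--     marked = []
--     current = 1
--     k = 1
--
--     while len(marked) < n:
--         k += k + 1
--         current += k//2
--         marked.append(k)
--
--     return marked
--
-- n = 100
-- ===== SOURCE B (Python) =====
-- def A000225(n):
--     return [(1 << (i + 2)) - 1 for i in range(n)]
-- ===== Notes on version B (the rewrite author's own statement) =====
-- stated objective: simpler
-- what changed: Replaced the iterative doubling recurrence on a running k (with an unused running 'current') by a one-line closed form computing each element independently from its index as a bit shift minus one.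
import Mathlib
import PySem

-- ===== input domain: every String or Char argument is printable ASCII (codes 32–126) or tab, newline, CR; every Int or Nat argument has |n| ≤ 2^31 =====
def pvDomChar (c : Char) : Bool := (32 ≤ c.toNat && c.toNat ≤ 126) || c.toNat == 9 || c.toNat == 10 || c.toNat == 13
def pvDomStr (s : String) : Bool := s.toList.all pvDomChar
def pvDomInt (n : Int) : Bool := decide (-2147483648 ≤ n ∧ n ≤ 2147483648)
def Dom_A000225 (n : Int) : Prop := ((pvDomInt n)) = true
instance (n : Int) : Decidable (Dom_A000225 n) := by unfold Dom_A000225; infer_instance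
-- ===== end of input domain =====

-- B replaces A's iterative doubling recurrence (k += k+1, plus an unused running 'current')
-- by the closed form (1 << (i+2)) - 1 per index: simpler.


-- ===== PORT A =====
-- A's while loop: each iteration appends one element, so it runs exactly n.toNat times
-- (len(marked) grows by 1 per iteration from 0); state (marked, current, k) is carried as in A.
def A000225_loop : Nat → List Int → Int → Int → List Int
  | 0, marked, _, _ => marked
  | m + 1, marked, current, k =>
    let k' := k + (k + 1)
    let current' := current + PySem.Int.floordiv k' 2
    A000225_loop m (marked ++ [k']) current' k'

def A000225 (n : Int) : List Int := A000225_loop n.toNat [] 1 1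

-- ===== PORT B =====
-- Python's 1 << (i+2) is ported as 2 ^ (i+2).toNat (exact: left shift by a nonnegative amount).
def A000225_alt (n : Int) : List Int :=
  (PySem.List.pyRange 0 n 1).map (fun i => 2 ^ (i + 2).toNat - 1)

-- ===== PRECONDITION & SPEC =====
def Spec_A000225 (n : Int) (out : List Int) : Prop := out = A000225_alt n
instance (n : Int) (out : List Int) : Decidable (Spec_A000225 n out) := by unfold Spec_A000225; infer_instance

-- ===== CLAIM (what is proved, stated in full; the proofs are below) =====
def Claim_equal_A000225 : Prop := ∀ (n : Int), Dom_A000225 n → Spec_A000225 n (A000225 n)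

-- ===== LEMMAS AND PROOFS =====

-- A's loop appends (k+1)*2^(i+1) - 1 at step i, for any starting state.
theorem A000225_loop_eq (m : Nat) : ∀ (marked : List Int) (current k : Int),
    A000225_loop m marked current k
      = marked ++ (List.range m).map (fun i => (k + 1) * 2 ^ (i + 1) - 1) := by
  induction m with
  | zero => intro marked current k; simp [A000225_loop]
  | succ m ih =>
    intro marked current k
    rw [A000225_loop, ih]
    rw [List.range_succ_eq_map]
    simp only [List.map_cons, List.map_map]
    have h1 : k + (k + 1) = (k + 1) * 2 ^ (0 + 1) - 1 := by ring
    have h2 : ∀ i : Nat, (k + (k + 1) + 1) * 2 ^ (i + 1) - 1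
        = (k + 1) * 2 ^ (i + 1 + 1) - 1 := by
      intro i
      rw [show (k:Int) + (k + 1) + 1 = (k + 1) * 2 by ring, pow_succ]
      ring
    simp only [List.append_assoc, List.singleton_append]
    congr 1
    refine congrArg₂ List.cons h1 ?_
    refine List.map_congr_left ?_
    intro i _
    simp only [Function.comp_apply]
    exact h2 i

theorem alt_eq (n : Int) :
    A000225_alt n = (List.range n.toNat).map (fun i => (1 + 1) * 2 ^ (i + 1) - 1) := by
  unfold A000225_alt
  rw [PySem.List.pyRange_one]
  simp only [Int.sub_zero, List.map_map]
  congr 1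
  funext i
  simp only [Function.comp_apply, zero_add]
  have : ((i : Int) + 2).toNat = i + 2 := by omega
  rw [this]
  rw [show i + 2 = i + 1 + 1 from rfl, pow_succ]
  ring

-- ===== VERDICT (by name: the statement is the Claim_ definition above) =====
theorem A000225_spec : Claim_equal_A000225 := by
  intro n _
  unfold Spec_A000225 A000225
  rw [A000225_loop_eq, alt_eq]
  simp
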